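-- pv_equiv track=rewrite | github.com/Hongying-LIN/Rosalind_Practice | Chapter_9/BA9M_betterBWMatching.py | Create_CountDict
-- ===== SOURCE A (Python) =====
-- alphabet = ['A', 'T', 'G', 'C', '$']
--
-- def Create_CountDict(LastColumn):
--     count_dict = dict()
--     for ch in alphabet:
--         count_dict[ch] = [0] * (len(LastColumn) + 1)
--     for i in range(len(LastColumn)):
--         a_acid = LastColumn[i]
--         for ch in alphabet:
--             if ch == a_acid:
--                 count_dict[ch][i+1] = count_dict[ch][i] + 1
--             else:
--                 count_dict[ch][i+1] = count_dict[ch][i]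
--     return count_dict
-- ===== SOURCE B (Python) =====
-- alphabet = ['A', 'T', 'G', 'C', '$']
--
-- def _cum_from_positions(LastColumn, ch):
--     # step-function construction: list the occurrence positions of ch, then
--     # emit constant runs between consecutive occurrences (run-length expansion)
--     n = len(LastColumn)
--     occ = [i for i, c in enumerate(LastColumn) if c == ch]
--     arr = []
--     prev = -1
--     for k, p in enumerate(occ):
--         arr.extend([k] * (p - prev))
--         prev = p
--     arr.extend([len(occ)] * (n - prev))
--     return arr
--
-- def Create_CountDict(LastColumn):
--     return {ch: _cum_from_positions(LastColumn, ch) for ch in alphabet}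
-- ===== Notes on version B (the rewrite author's own statement) =====
-- stated objective: alternative
-- what changed: A fills all five count arrays in one fused indexed pass, updating slot i+1 from slot i of every array at each position; B instead, for each character independently, lists its occurrence positions and builds the cumulative array by run-length expansion of the resulting step function (constant runs between consecutive occurrences), never maintaining a running per-index recurrence.
import Mathlib
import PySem

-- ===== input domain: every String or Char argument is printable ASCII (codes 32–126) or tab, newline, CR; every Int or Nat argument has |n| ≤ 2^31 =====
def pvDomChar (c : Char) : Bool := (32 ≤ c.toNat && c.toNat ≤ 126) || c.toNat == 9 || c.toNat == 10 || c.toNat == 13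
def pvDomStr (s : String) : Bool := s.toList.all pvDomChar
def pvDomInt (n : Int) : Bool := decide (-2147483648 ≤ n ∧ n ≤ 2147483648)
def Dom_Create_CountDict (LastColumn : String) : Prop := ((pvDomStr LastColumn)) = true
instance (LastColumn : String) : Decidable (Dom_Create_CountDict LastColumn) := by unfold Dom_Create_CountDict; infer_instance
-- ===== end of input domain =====

-- B replaces A's single fused per-index pass (updating all five arrays at slot i+1 from slot i)
-- by, per character, listing its occurrence positions and run-length-expanding the resulting
-- step function into the cumulative array (objective: alternative, same O(n) cost).


-- module-level constant shared by both Pythons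
def pvAlphabet : List String := ["A", "T", "G", "C", "$"]

-- ===== PORT A =====
-- literal port of A: initialise all five arrays to zeros, then one fused pass over the
-- indices updating every array at slot i+1 from slot i
def Create_CountDict (LastColumn : String) : List (String × List Int) :=
  let cs := LastColumn.toList
  let n := cs.length
  let d0 : PySem.Dict String (List Int) :=
    pvAlphabet.foldl (fun d ch => d.insert ch (List.replicate (n + 1) (0 : Int))) PySem.Dict.empty
  let d :=
    (List.range n).foldl (fun d i =>
      let a_acid : String := String.ofList [cs.getD i ' ']   -- LastColumn[i]; i < n so the default is never used
      pvAlphabet.foldl (fun d ch =>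
        if ch == a_acid then
          d.modify ch [] (fun arr => arr.set (i + 1) (arr.getD i 0 + 1))
        else
          d.modify ch [] (fun arr => arr.set (i + 1) (arr.getD i 0))) d) d0
  d.items

-- ===== PORT B =====
-- literal port of B: per character, list the occurrence positions, then emit constant
-- runs between consecutive occurrences (run-length expansion of the step function)
def pvCum (cs : List Char) (ch : String) : List Int :=
  let n := cs.length
  let occ : List Int :=
    ((PySem.List.enumerate cs 0).filter (fun p => String.ofList [p.2] == ch)).map Prod.fst
  let st :=
    (PySem.List.enumerate occ 0).foldl
      (fun (st : List Int × Int) kp =>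
        (st.1 ++ List.replicate (kp.2 - st.2).toNat kp.1, kp.2)) ([], (-1 : Int))
  st.1 ++ List.replicate ((n : Int) - st.2).toNat (occ.length : Int)

def Create_CountDict_alt (LastColumn : String) : List (String × List Int) :=
  pvAlphabet.map (fun ch => (ch, pvCum LastColumn.toList ch))

-- ===== PRECONDITION & SPEC =====
def Spec_Create_CountDict (LastColumn : String) (out : List (String × List Int)) : Prop := out = Create_CountDict_alt LastColumn
instance (LastColumn : String) (out : List (String × List Int)) : Decidable (Spec_Create_CountDict LastColumn out) := by unfold Spec_Create_CountDict; infer_instance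

-- ===== CLAIM (what is proved, stated in full; the proofs are below) =====
def Claim_equal_Create_CountDict : Prop := ∀ (LastColumn : String), Dom_Create_CountDict LastColumn → Spec_Create_CountDict LastColumn (Create_CountDict LastColumn)

-- ===== LEMMAS AND PROOFS =====

-- reference: the running-count scan, one entry per character
def pvScan (ch : String) (t : Int) : List Char → List Int
  | [] => []
  | c :: rest =>
      let t' := t + (if String.ofList [c] == ch then 1 else 0)
      t' :: pvScan ch t' rest

theorem pvScan_length (ch : String) (t : Int) (cs : List Char) :
    (pvScan ch t cs).length = cs.length := by
  induction cs generalizing t with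
  | nil => rfl
  | cons c rest ih => simp [pvScan, ih]

theorem pvScan_append (ch : String) (t : Int) (xs ys : List Char) :
    pvScan ch t (xs ++ ys)
      = pvScan ch t xs ++ pvScan ch (t + ((xs.countP (fun c => String.ofList [c] == ch) : Nat) : Int)) ys := by
  induction xs generalizing t with
  | nil => simp [pvScan]
  | cons c rest ih =>
      simp only [List.cons_append, pvScan, ih, List.countP_cons]
      by_cases h : String.ofList [c] == ch <;> simp [h] <;> ring_nf

theorem pvScan_getD_last (ch : String) (t : Int) (xs : List Char) :
    (t :: pvScan ch t xs).getD xs.length 0 = t + ((xs.countP (fun c => String.ofList [c] == ch) : Nat) : Int) := by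
  induction xs generalizing t with
  | nil => simp
  | cons c rest ih =>
      simp only [pvScan, List.length_cons, List.getD_cons_succ, ih, List.countP_cons]
      by_cases h : String.ofList [c] == ch <;> simp [h] <;> ring_nf

-- ---------- A side ----------

-- the array A maintains for character ch after the first k indices have been processed
def pvStateArr (cs : List Char) (k : Nat) (ch : String) : List Int :=
  ((0 : Int) :: pvScan ch 0 (cs.take k)) ++ List.replicate (cs.length - k) 0

-- one inner pass over the (nodup) alphabet modifies each key once
theorem pvFoldl_modify_getD {l : List String} (hnd : l.Nodup)
    (g : String → List Int → List Int) (d : PySem.Dict String (List Int)) (x : String) :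
    (l.foldl (fun d k => d.modify k [] (g k)) d).getD x []
      = if x ∈ l then g x (d.getD x []) else d.getD x [] := by
  induction l generalizing d with
  | nil => simp
  | cons k rest ih =>
      obtain ⟨hk, hnd'⟩ := List.nodup_cons.mp hnd
      simp only [List.foldl_cons, ih hnd']
      by_cases hx : x = k
      · subst hx
        simp [hk, PySem.Dict.getD_modify_self]
      · simp [PySem.Dict.getD_modify, hx]

-- proof-only names for A's two phases
def pvD0 (n : Nat) : PySem.Dict String (List Int) :=
  pvAlphabet.foldl (fun d ch => d.insert ch (List.replicate (n + 1) (0 : Int))) PySem.Dict.empty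

def pvLoop (cs : List Char) (k : Nat) : PySem.Dict String (List Int) :=
  (List.range k).foldl (fun d i =>
    let a_acid : String := String.ofList [cs.getD i ' ']
    pvAlphabet.foldl (fun d ch =>
      if ch == a_acid then
        d.modify ch [] (fun arr => arr.set (i + 1) (arr.getD i 0 + 1))
      else
        d.modify ch [] (fun arr => arr.set (i + 1) (arr.getD i 0))) d) (pvD0 cs.length)

-- the update A performs on ch's array at step i, as a single function
def pvG (cs : List Char) (i : Nat) (ch : String) (arr : List Int) : List Int :=
  arr.set (i + 1) (arr.getD i 0 + (if ch == String.ofList [cs.getD i ' '] then 1 else 0))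

theorem pvCreate_eq_loop (s : String) :
    Create_CountDict s = (pvLoop s.toList s.toList.length).items := rfl

theorem pvBody_eq (cs : List Char) (i : Nat) :
    (fun (d : PySem.Dict String (List Int)) ch =>
      if ch == String.ofList [cs.getD i ' '] then
        d.modify ch [] (fun arr => arr.set (i + 1) (arr.getD i 0 + 1))
      else
        d.modify ch [] (fun arr => arr.set (i + 1) (arr.getD i 0)))
    = fun d ch => d.modify ch [] (pvG cs i ch) := by
  funext d ch
  by_cases h : ch = String.ofList [cs.getD i ' ']
  · rw [h]
    unfold pvG
    simp only [beq_self_eq_true, if_true]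
  · have hb : (ch == String.ofList [cs.getD i ' ']) = false := beq_eq_false_iff_ne.mpr h
    unfold pvG
    simp only [hb, Bool.false_eq_true, if_false, add_zero]

theorem pvD0_items (n : Nat) :
    (pvD0 n).items = pvAlphabet.map (fun ch => (ch, List.replicate (n + 1) (0 : Int))) := by
  have := PySem.Dict.items_foldl_insert_fresh (l := pvAlphabet) (d := PySem.Dict.empty)
    (k := fun a => a) (v := fun _ => List.replicate (n + 1) (0 : Int))
    (by decide) (by decide)
  simpa [pvD0] using this

theorem pvD0_keys (n : Nat) : (pvD0 n).keys = pvAlphabet := by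
  simp only [PySem.Dict.keys, pvD0_items, List.map_map]
  rfl

theorem pvD0_getD (n : Nat) (x : String) (hx : x ∈ pvAlphabet) :
    (pvD0 n).getD x [] = List.replicate (n + 1) (0 : Int) := by
  apply PySem.Dict.getD_of_mem_items
  · rw [pvD0_items]
    exact List.mem_map.mpr ⟨x, hx, rfl⟩
  · rw [pvD0_keys]; decide

theorem pvLoop_keys (cs : List Char) (k : Nat) : (pvLoop cs k).keys = pvAlphabet := by
  induction k with
  | zero => simp [pvLoop, List.range_zero, pvD0_keys]
  | succ k ih =>
      rw [pvLoop, List.range_succ, List.foldl_append] at *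
      simp only [List.foldl_cons, List.foldl_nil]
      rw [pvBody_eq, PySem.Dict.keys_foldl_modify, ih]
      decide

theorem pvStateArr_zero (cs : List Char) (x : String) :
    pvStateArr cs 0 x = List.replicate (cs.length + 1) (0 : Int) := by
  simp [pvStateArr, pvScan, List.replicate_succ]

theorem pvStateArr_step (cs : List Char) (k : Nat) (hk : k < cs.length) (x : String) :
    pvG cs k x (pvStateArr cs k x) = pvStateArr cs (k + 1) x := by
  have hTl : (cs.take k).length = k := by simp; omega
  have hlen : ((0 : Int) :: pvScan x 0 (cs.take k)).length = k + 1 := by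
    simp [pvScan_length, hTl]
  unfold pvG pvStateArr
  rw [List.getD_append _ _ _ k (by rw [hlen]; omega)]
  have hread : ((0 : Int) :: pvScan x 0 (cs.take k)).getD k 0
      = (((cs.take k).countP (fun c => String.ofList [c] == x) : Nat) : Int) := by
    have h := pvScan_getD_last x 0 (cs.take k)
    rw [hTl] at h
    simpa using h
  rw [hread]
  rw [show k + 1 = ((0 : Int) :: pvScan x 0 (cs.take k)).length from hlen.symm,
    List.set_append_right _ _ (Nat.le_refl _), Nat.sub_self]
  rw [show cs.length - k = (cs.length - (k + 1)) + 1 by omega, List.replicate_succ,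
    List.set_cons_zero]
  rw [hlen]
  rw [List.take_succ, List.getElem?_eq_getElem hk]
  rw [pvScan_append]
  have hget : cs.getD k ' ' = cs[k] := List.getD_eq_getElem cs ' ' hk
  rw [hget]
  by_cases hxy : x = String.ofList [cs[k]]
  · simp [pvScan, hxy, List.append_assoc]
  · have h1 : (x == String.ofList [cs[k]]) = false := beq_eq_false_iff_ne.mpr hxy
    have h2 : (String.ofList [cs[k]] == x) = false := beq_eq_false_iff_ne.mpr (Ne.symm hxy)
    simp [pvScan, h1, h2, List.append_assoc]

theorem pvLoop_getD (cs : List Char) (k : Nat) (hk : k ≤ cs.length) (x : String)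
    (hx : x ∈ pvAlphabet) :
    (pvLoop cs k).getD x [] = pvStateArr cs k x := by
  induction k with
  | zero => rw [pvLoop, List.range_zero, List.foldl_nil, pvD0_getD _ _ hx, pvStateArr_zero]
  | succ k ih =>
      rw [pvLoop, List.range_succ, List.foldl_append] at *
      simp only [List.foldl_cons, List.foldl_nil]
      rw [pvBody_eq, pvFoldl_modify_getD (by decide) _ _ x, if_pos hx,
        ih (Nat.le_of_lt hk), pvStateArr_step cs k hk x]

theorem pvStateArr_full (cs : List Char) (x : String) :
    pvStateArr cs cs.length x = (0 : Int) :: pvScan x 0 cs := by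
  simp [pvStateArr]

-- ---------- B side ----------

-- recursive form of B's run-expansion fold
def pvExpandAux (prev k : Int) : List Int → List Int
  | [] => []
  | p :: rest => List.replicate (p - prev).toNat k ++ pvExpandAux p (k + 1) rest

-- B's occurrence-position list for ch
def pvOccOf (cs : List Char) (ch : String) : List Int :=
  ((PySem.List.enumerate cs 0).filter (fun p => String.ofList [p.2] == ch)).map Prod.fst

theorem pvFold_expand (occ : List Int) (acc : List Int) (prev k : Int) :
    (PySem.List.enumerate occ k).foldl
      (fun (st : List Int × Int) kp =>
        (st.1 ++ List.replicate (kp.2 - st.2).toNat kp.1, kp.2)) (acc, prev)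
    = (acc ++ pvExpandAux prev k occ, occ.getLastD prev) := by
  induction occ generalizing acc prev k with
  | nil => simp [PySem.List.enumerate_nil, pvExpandAux]
  | cons p rest ih =>
      rw [PySem.List.enumerate_cons]
      simp only [List.foldl_cons]
      rw [ih]
      rw [show (p :: rest).getLastD prev = rest.getLastD p from by
        cases rest <;> simp [List.getLastD]]
      simp [pvExpandAux, List.append_assoc]

theorem pvCum_def (cs : List Char) (ch : String) :
    pvCum cs ch = pvExpandAux (-1) 0 (pvOccOf cs ch)
      ++ List.replicate ((cs.length : Int) - (pvOccOf cs ch).getLastD (-1)).toNat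
           ((pvOccOf cs ch).length : Int) := by
  show ((PySem.List.enumerate (pvOccOf cs ch) 0).foldl
      (fun (st : List Int × Int) kp =>
        (st.1 ++ List.replicate (kp.2 - st.2).toNat kp.1, kp.2)) ([], (-1 : Int))).1
      ++ List.replicate ((cs.length : Int) - ((PySem.List.enumerate (pvOccOf cs ch) 0).foldl
      (fun (st : List Int × Int) kp =>
        (st.1 ++ List.replicate (kp.2 - st.2).toNat kp.1, kp.2)) ([], (-1 : Int))).2).toNat
        ((pvOccOf cs ch).length : Int) = _
  rw [pvFold_expand]
  rfl

theorem pvExpandAux_snoc (occ : List Int) (prev k q : Int) :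
    pvExpandAux prev k (occ ++ [q])
      = pvExpandAux prev k occ
        ++ List.replicate (q - occ.getLastD prev).toNat (k + (occ.length : Int)) := by
  induction occ generalizing prev k with
  | nil => simp [pvExpandAux]
  | cons p rest ih =>
      have hl : (p :: rest).getLastD prev = rest.getLastD p := by
        cases rest <;> simp [List.getLastD]
      have hc : k + 1 + (rest.length : Int) = k + ((rest.length : Nat) + 1 : Nat) := by
        push_cast; ring
      simp only [List.cons_append, pvExpandAux, ih, hl, List.length_cons, List.append_assoc, hc]

theorem pvOccOf_snoc (cs : List Char) (c : Char) (ch : String) :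
    pvOccOf (cs ++ [c]) ch
      = pvOccOf cs ch ++ (if String.ofList [c] == ch then [((cs.length : Nat) : Int)] else []) := by
  unfold pvOccOf
  rw [PySem.List.enumerate_append, List.filter_append, List.map_append]
  by_cases h : String.ofList [c] == ch <;>
    simp [PySem.List.enumerate_cons, PySem.List.enumerate_nil, h]

theorem pvOccOf_length (cs : List Char) (ch : String) :
    (pvOccOf cs ch).length = cs.countP (fun c => String.ofList [c] == ch) := by
  induction cs using List.reverseRecOn with
  | nil => simp [pvOccOf, PySem.List.enumerate_nil]
  | append_singleton cs c ih =>
      rw [pvOccOf_snoc, List.countP_append]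
      by_cases h : String.ofList [c] == ch <;> simp [h, ih]

-- B's run-expansion equals the running-count scan, with the final prev bounded
theorem pvCum_eq_scan (cs : List Char) (ch : String) :
    pvCum cs ch = (0 : Int) :: pvScan ch 0 cs
      ∧ (pvOccOf cs ch).getLastD (-1) < (cs.length : Int) := by
  induction cs using List.reverseRecOn with
  | nil =>
      constructor
      · rw [pvCum_def]
        simp [pvOccOf, PySem.List.enumerate_nil, pvExpandAux, pvScan]
      · simp [pvOccOf, PySem.List.enumerate_nil]
  | append_singleton cs c ih =>
      obtain ⟨ihEq, ihLt⟩ := ih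
      have hcount := pvOccOf_length cs ch
      by_cases h : String.ofList [c] == ch
      · -- occ gains a final position cs.length
        have hsnoc := pvOccOf_snoc cs c ch
        rw [if_pos h] at hsnoc
        constructor
        · rw [pvCum_def, hsnoc, pvExpandAux_snoc]
          have hlast : (pvOccOf cs ch ++ [((cs.length : Nat) : Int)]).getLastD (-1)
              = ((cs.length : Nat) : Int) := by simp
          rw [hlast]
          have hrep1 : (((cs ++ [c]).length : Int) - ((cs.length : Nat) : Int)).toNat = 1 := by
            simp
          rw [hrep1]
          rw [pvCum_def] at ihEq
          rw [pvScan_append]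
          have : pvScan ch (0 + ((cs.countP (fun c => String.ofList [c] == ch) : Nat) : Int)) [c]
              = [((cs.countP (fun c => String.ofList [c] == ch) : Nat) : Int) + 1] := by
            simp [pvScan, h]
          rw [this]
          rw [← List.cons_append, ← ihEq]
          simp [hcount]
        · rw [hsnoc]
          simp
      · have hsnoc := pvOccOf_snoc cs c ch
        rw [if_neg h, List.append_nil] at hsnoc
        constructor
        · rw [pvCum_def, hsnoc]
          have hlen : ((cs ++ [c]).length : Int) = (cs.length : Int) + 1 := by simp
          rw [hlen]
          have hstep : ((cs.length : Int) + 1 - (pvOccOf cs ch).getLastD (-1)).toNat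
              = ((cs.length : Int) - (pvOccOf cs ch).getLastD (-1)).toNat + 1 := by omega
          rw [hstep, List.replicate_succ' ]
          rw [pvCum_def] at ihEq
          rw [pvScan_append]
          have : pvScan ch (0 + ((cs.countP (fun c => String.ofList [c] == ch) : Nat) : Int)) [c]
              = [((cs.countP (fun c => String.ofList [c] == ch) : Nat) : Int)] := by
            simp [pvScan, h]
          rw [this]
          rw [← List.cons_append, ← ihEq, ← List.append_assoc]
          congr 2
          rw [hcount]
        · rw [hsnoc]
          have : ((cs ++ [c]).length : Int) = (cs.length : Int) + 1 := by simp
          omega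

-- ===== VERDICT (by name: the statement is the Claim_ definition above) =====
theorem Create_CountDict_spec : Claim_equal_Create_CountDict := by
  unfold Claim_equal_Create_CountDict
  intro s _
  unfold Spec_Create_CountDict Create_CountDict_alt
  rw [pvCreate_eq_loop]
  rw [PySem.Dict.items_eq_map_keys _ (by rw [pvLoop_keys]; decide) []]
  rw [pvLoop_keys]
  exact List.map_congr_left (fun ch hch => by
    rw [pvLoop_getD _ _ (Nat.le_refl _) _ hch, pvStateArr_full, (pvCum_eq_scan s.toList ch).1])
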